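-- pv_equiv track=rewrite | github.com/Subby02/Coding-Test | 5. BinarySearch/Q30.py | query_range
-- ===== SOURCE A (Python) =====
-- def query_range(query):
--   min_query = ''
--   max_query = ''
--   for i in range(len(query)):
--     if query[i] == '?':
--       min_query += 'a'
--       max_query += 'z'
--     else:
--       min_query += query[i]
--       max_query += query[i]
--
--   return min_query , max_query
-- ===== SOURCE B (Python) =====
-- def query_range(query):
--   parts = query.split('?')
--   return 'a'.join(parts), 'z'.join(parts)
-- ===== Notes on version B (the rewrite author's own statement) =====
-- stated objective: alternative
-- what changed: Instead of a per-character loop classifying each character and appending to two accumulator strings, B cuts the string once into the segments between the question-mark occurrences (str.split) and reassembles those segments twice with join; the unit of work is a segment, not a character, and no character is compared after the split.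
import Mathlib
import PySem

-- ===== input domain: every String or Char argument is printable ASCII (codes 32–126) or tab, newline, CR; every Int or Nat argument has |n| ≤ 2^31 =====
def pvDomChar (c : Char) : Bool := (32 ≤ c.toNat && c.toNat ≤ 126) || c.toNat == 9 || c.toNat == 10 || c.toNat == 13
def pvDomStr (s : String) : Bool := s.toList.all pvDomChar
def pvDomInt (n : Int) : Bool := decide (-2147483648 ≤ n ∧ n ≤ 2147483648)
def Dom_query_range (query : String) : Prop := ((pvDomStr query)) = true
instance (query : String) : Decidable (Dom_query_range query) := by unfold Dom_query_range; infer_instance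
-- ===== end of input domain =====

-- B cuts the string once into the segments between '?' (split) and reassembles them twice
-- with 'a'.join / 'z'.join, instead of A's per-character loop building both strings (alternative decomposition).

-- ===== PORT A =====
-- A: for i in range(len(query)): append to min_query/max_query depending on query[i] == '?'
def query_range (query : String) : String × String :=
  let r := query.toList.foldl
    (fun (p : List Char × List Char) c =>
      if c = '?' then (p.1 ++ ['a'], p.2 ++ ['z']) else (p.1 ++ [c], p.2 ++ [c]))
    ([], [])
  (String.ofList r.1, String.ofList r.2)

-- ===== PORT B =====
-- B: parts = query.split('?'); return 'a'.join(parts), 'z'.join(parts)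
-- (PySem.Chars.splitOn is the sep ≠ "" form of str.split; PySem.Str.join = sep.join)
def query_range_alt (query : String) : String × String :=
  let parts := (PySem.Chars.splitOn query.toList ['?']).map String.ofList
  (PySem.Str.join "a" parts, PySem.Str.join "z" parts)

-- ===== PRECONDITION & SPEC =====
def Spec_query_range (query : String) (out : String × String) : Prop := out = query_range_alt query
instance (query : String) (out : String × String) : Decidable (Spec_query_range query out) := by unfold Spec_query_range; infer_instance

-- ===== CLAIM (what is proved, stated in full; the proofs are below) =====
def Claim_equal_query_range : Prop := ∀ (query : String), Dom_query_range query → Spec_query_range query (query_range query)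

-- ===== LEMMAS AND PROOFS =====

-- reference splitter: segments of l between '?' occurrences (always nonempty)
def pvConsHd (c : Char) : List (List Char) → List (List Char)
  | [] => [[c]]
  | h :: t => (c :: h) :: t

def pvSpl : List Char → List (List Char)
  | [] => [[]]
  | c :: t => if c = '?' then [] :: pvSpl t else pvConsHd c (pvSpl t)

def pvPrepHd (p : List Char) : List (List Char) → List (List Char)
  | [] => [p]
  | h :: t => (p ++ h) :: t

theorem pvSpl_ne_nil (l : List Char) : pvSpl l ≠ [] := by
  cases l with
  | nil => simp [pvSpl]
  | cons c t =>
    simp only [pvSpl]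
    split
    · simp
    · cases h : pvSpl t <;> simp [pvConsHd]

theorem splitOn_go_eq (fuel : Nat) : ∀ (l cur : List Char) (accl : List (List Char)),
    l.length ≤ fuel →
    PySem.Chars.splitOn.go ['?'] fuel l cur accl =
      accl.reverse ++ pvPrepHd cur.reverse (pvSpl l) := by
  induction fuel with
  | zero =>
    intro l cur accl h
    have : l = [] := List.eq_nil_of_length_eq_zero (Nat.le_zero.mp h)
    subst this
    simp [PySem.Chars.splitOn.go, pvSpl, pvPrepHd]
  | succ n ih =>
    intro l cur accl h
    cases l with
    | nil => simp [PySem.Chars.splitOn.go, pvSpl, pvPrepHd]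
    | cons c t =>
      by_cases hc : c = '?'
      · subst hc
        simp only [PySem.Chars.splitOn.go]
        have hp : ['?'].isPrefixOf ('?' :: t) = true := by simp [List.isPrefixOf]
        rw [if_pos hp]
        simp only [List.length_cons, List.length_nil, List.drop_succ_cons, List.drop_zero]
        rw [ih t [] (cur.reverse :: accl) (by simpa using h)]
        cases hs : pvSpl t with
        | nil => exact absurd hs (pvSpl_ne_nil t)
        | cons p rest => simp [pvSpl, hs, pvPrepHd]
      · simp only [PySem.Chars.splitOn.go]
        rw [if_neg (by simp [List.isPrefixOf]; exact fun e => hc e.symm)]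
        rw [ih t (c :: cur) accl (by simpa using h)]
        cases hs : pvSpl t with
        | nil => exact absurd hs (pvSpl_ne_nil t)
        | cons p rest => simp [pvSpl, hc, hs, pvPrepHd, pvConsHd]

theorem splitOn_eq_spl (l : List Char) :
    PySem.Chars.splitOn l ['?'] = pvSpl l := by
  unfold PySem.Chars.splitOn
  rw [splitOn_go_eq (l.length + 1) l [] [] (by omega)]
  cases hs : pvSpl l with
  | nil => exact absurd hs (pvSpl_ne_nil l)
  | cons p rest => simp [pvPrepHd]

theorem join_spl (z : Char) (l : List Char) :
    PySem.Chars.join [z] (pvSpl l) = l.map (fun c => if c = '?' then z else c) := by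
  induction l with
  | nil => simp [pvSpl, PySem.Chars.join_singleton]
  | cons c t ih =>
    by_cases hc : c = '?'
    · subst hc
      cases hs : pvSpl t with
      | nil => exact absurd hs (pvSpl_ne_nil t)
      | cons p rest =>
        have h1 : pvSpl ('?' :: t) = [] :: p :: rest := by simp [pvSpl, hs]
        rw [h1, PySem.Chars.join_cons_cons, ← hs, ih]
        simp
    · cases hs : pvSpl t with
      | nil => exact absurd hs (pvSpl_ne_nil t)
      | cons p rest =>
        simp only [pvSpl, if_neg hc, hs, pvConsHd]
        have : PySem.Chars.join [z] ((c :: p) :: rest) =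
            c :: PySem.Chars.join [z] (p :: rest) := by
          cases rest with
          | nil => simp [PySem.Chars.join_singleton]
          | cons q r => rw [PySem.Chars.join_cons_cons, PySem.Chars.join_cons_cons]; simp
        rw [this, ← hs, ih]
        simp [hc]

theorem foldl_pair (cs : List Char) : ∀ (p q : List Char),
    cs.foldl
      (fun (r : List Char × List Char) c =>
        if c = '?' then (r.1 ++ ['a'], r.2 ++ ['z']) else (r.1 ++ [c], r.2 ++ [c]))
      (p, q) =
    (p ++ cs.map (fun c => if c = '?' then 'a' else c),
     q ++ cs.map (fun c => if c = '?' then 'z' else c)) := by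
  induction cs with
  | nil => simp
  | cons c t ih =>
    intro p q
    by_cases hc : c = '?' <;> simp [hc, ih]

-- ===== VERDICT (by name: the statement is the Claim_ definition above) =====
theorem query_range_spec : Claim_equal_query_range := by
  intro query _
  unfold Spec_query_range query_range query_range_alt
  rw [foldl_pair]
  simp only [PySem.Str.join, List.map_map, Function.comp_def, String.toList_ofList,
    splitOn_eq_spl]
  rw [show ("a" : String).toList = ['a'] from rfl, show ("z" : String).toList = ['z'] from rfl]
  simp only [show (fun x : List Char => x) = id from rfl, List.map_id]
  rw [join_spl 'a', join_spl 'z']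
  simp
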